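-- pv_equiv track=rewrite | github.com/hasnain-cyber/competitive-programming | hackerrank/palindromic-border.py | countBorderPalindromes
-- ===== SOURCE A (Python) =====
-- countDict = dict()
--
-- def isPalindrome(s):
--     length = len(s) // 2
--     for i in range(length):
--         if not s[i] == s[-i - 1]:
--             return False
--     return True
--
-- def countBorderPalindromes(s):
--     length = len(s)
--
--     counter = 0
--     for i in range(1, length):
--         if s[:i] == s[-i:] and isPalindrome(s[:i]):
--             counter += 1
--
--     countDict[s] = counter
--     return counter
-- ===== SOURCE B (Python) =====
-- countDict = dict()
--
-- def countBorderPalindromes(s):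
--     n = len(s)
--     r = s[::-1]
--     # k = length of the longest common prefix of s and reversed s;
--     # a border s[:i] is a palindrome iff s[:i] == r[:i], i.e. iff i <= k.
--     k = 0
--     while k < n and s[k] == r[k]:
--         k += 1
--     counter = 0
--     for i in range(1, min(k + 1, n)):
--         if s[:i] == s[-i:]:
--             counter += 1
--     countDict[s] = counter
--     return counter
-- ===== Notes on version B (the rewrite author's own statement) =====
-- stated objective: faster
-- what changed: B replaces the per-border palindrome test by a single linear scan computing k = lcp(s, reversed(s)) and then counts borders only for lengths i <= k, using the fact that a border s[:i] is a palindrome iff s[:i] == reversed(s)[:i].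
import Mathlib
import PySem

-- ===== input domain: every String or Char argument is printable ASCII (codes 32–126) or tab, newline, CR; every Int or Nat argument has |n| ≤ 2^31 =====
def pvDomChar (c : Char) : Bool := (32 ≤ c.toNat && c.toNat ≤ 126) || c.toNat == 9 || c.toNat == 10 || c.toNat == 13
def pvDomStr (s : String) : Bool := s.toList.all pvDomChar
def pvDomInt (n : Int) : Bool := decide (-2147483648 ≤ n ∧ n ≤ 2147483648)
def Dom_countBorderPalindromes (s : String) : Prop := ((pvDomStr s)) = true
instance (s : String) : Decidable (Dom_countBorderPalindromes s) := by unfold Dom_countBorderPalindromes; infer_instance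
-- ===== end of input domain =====

-- B replaces the per-border palindrome test by one lcp(s, reversed s) scan bounding the border loop
-- (measured faster); equivalence is about the RETURN value (both Pythons also write countDict[s] identically).

-- ===== PORT A =====
def isPalindromeA (w : List Char) : Bool :=
  (PySem.List.pyRange 0 (PySem.Int.floordiv (PySem.List.len w) 2) 1).all
    (fun i => PySem.List.pyGetD w i ' ' == PySem.List.pyGetD w (-i - 1) ' ')

def countBorderPalindromes (s : String) : Int :=
  let cs := s.toList
  let length := PySem.List.len cs
  (PySem.List.pyRange 1 length 1).foldl
    (fun counter i =>
      if ((PySem.List.slice cs none (some i) == PySem.List.slice cs (some (-i)) none)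
          && isPalindromeA (PySem.List.slice cs none (some i)))
      then counter + 1 else counter) 0

-- ===== PORT B =====
-- the while loop 'k += 1 while s[k] == r[k]' as structural recursion over the two lists
def lcpAlt (xs ys : List Char) : Nat :=
  match xs, ys with
  | x :: xs', y :: ys' => if x = y then lcpAlt xs' ys' + 1 else 0
  | _, _ => 0

def countBorderPalindromes_alt (s : String) : Int :=
  let cs := s.toList
  let n := PySem.List.len cs
  let r := cs.reverse
  let k := lcpAlt cs r
  (PySem.List.pyRange 1 (min ((k : Int) + 1) n) 1).foldl
    (fun counter i =>
      if (PySem.List.slice cs none (some i) == PySem.List.slice cs (some (-i)) none)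
      then counter + 1 else counter) 0

-- ===== PRECONDITION & SPEC =====
def Spec_countBorderPalindromes (s : String) (out : Int) : Prop := out = countBorderPalindromes_alt s
instance (s : String) (out : Int) : Decidable (Spec_countBorderPalindromes s out) := by unfold Spec_countBorderPalindromes; infer_instance

-- ===== CLAIM (what is proved, stated in full; the proofs are below) =====
def Claim_equal_countBorderPalindromes : Prop := ∀ (s : String), Dom_countBorderPalindromes s → Spec_countBorderPalindromes s (countBorderPalindromes s)

-- ===== LEMMAS AND PROOFS =====

-- symmetric-half characterization of a palindrome
theorem half_palindrome (w : List Char)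
    (h : ∀ j : Nat, j < w.length / 2 → w.getD j ' ' = w.getD (w.length - (j+1)) ' ') :
    w.reverse = w := by
  apply List.ext_getElem (by simp)
  intro i h1 h2
  rw [List.getElem_reverse]
  simp only [List.length_reverse] at h1
  have key : ∀ j : Nat, (hj : j < w.length / 2) → w[j]'(by omega) = w[w.length - (j+1)]'(by omega) := by
    intro j hj
    have := h j hj
    rwa [List.getD_eq_getElem _ _ (by omega), List.getD_eq_getElem _ _ (by omega)] at this
  rcases lt_or_ge i (w.length / 2) with hi | hi
  · have := (key i hi).symm
    have e : w.length - (i + 1) = w.length - 1 - i := by omega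
    simpa [e] using this
  · have : w.length - 1 - i < w.length / 2 ∨ w.length - 1 - i = i := by omega
    rcases this with hj | hj
    · have := key _ hj
      have e : w.length - (w.length - 1 - i + 1) = i := by omega
      simp only [e] at this
      exact this
    · simp only [hj]

-- A's half-scan is exactly "the list is its own reverse"
theorem isPalindromeA_iff (w : List Char) : isPalindromeA w = true ↔ w.reverse = w := by
  have hfd : PySem.Int.floordiv (PySem.List.len w) 2 = ((w.length / 2 : Nat) : Int) := by
    rw [PySem.List.len_eq]; exact_mod_cast PySem.Int.floordiv_natCast w.length 2
  constructor
  · intro hall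
    rw [isPalindromeA, List.all_eq_true] at hall
    apply half_palindrome
    intro j hj
    have hmem : ((j : Int)) ∈ PySem.List.pyRange 0 (PySem.Int.floordiv (PySem.List.len w) 2) 1 := by
      rw [hfd, PySem.List.mem_pyRange_one]; constructor <;> [positivity; exact_mod_cast hj]
    have := hall _ hmem
    simp only [beq_iff_eq] at this
    have hneg : (-(j:Int) - 1) = -(((j+1 : Nat)) : Int) := by push_cast; ring
    rw [hneg, PySem.List.pyGetD_neg_natCast _ _ _ (by omega) (by omega), PySem.List.pyGetD_natCast] at this
    rw [this, List.getD_eq_getElem _ _ (by omega)]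
  · intro hrev
    rw [isPalindromeA, List.all_eq_true]
    intro x hx
    rw [hfd, PySem.List.mem_pyRange_one] at hx
    obtain ⟨hx0, hx1⟩ := hx
    obtain ⟨j, rfl⟩ : ∃ j : Nat, x = (j : Int) := ⟨x.toNat, by omega⟩
    have hj : j < w.length / 2 := by exact_mod_cast hx1
    have hneg : (-(j:Int) - 1) = -(((j+1 : Nat)) : Int) := by push_cast; ring
    simp only [beq_iff_eq, hneg]
    rw [PySem.List.pyGetD_neg_natCast _ _ _ (by omega) (by omega), PySem.List.pyGetD_natCast]
    have : w[w.length - (j+1)]'(by omega) = w.reverse[j]'(by simp; omega) := by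
      rw [List.getElem_reverse]; congr 1; omega
    rw [List.getD_eq_getElem _ _ (by omega), this]
    simp only [hrev]

-- lcpAlt bounds and characterizes equal prefixes
theorem lcpAlt_le (xs ys : List Char) : lcpAlt xs ys ≤ xs.length := by
  induction xs generalizing ys with
  | nil => simp [lcpAlt]
  | cons x xs ih =>
    cases ys with
    | nil => simp [lcpAlt]
    | cons y ys =>
      simp only [lcpAlt, List.length_cons]
      split_ifs with h
      · exact Nat.succ_le_succ (ih ys)
      · omega

theorem take_eq_take_iff_le_lcpAlt (xs ys : List Char) (j : Nat)
    (hx : j ≤ xs.length) (hy : j ≤ ys.length) :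
    xs.take j = ys.take j ↔ j ≤ lcpAlt xs ys := by
  induction xs generalizing ys j with
  | nil => simp at hx; subst hx; simp [lcpAlt]
  | cons x xs ih =>
    cases j with
    | zero => simp
    | succ j =>
      cases ys with
      | nil => simp at hy
      | cons y ys =>
        simp only [List.take_succ_cons, List.cons.injEq, lcpAlt]
        split_ifs with h
        · subst h
          simp only [List.length_cons, Nat.add_le_add_iff_right] at hx hy ⊢
          rw [ih ys j hx hy]
          simp
        · constructor
          · rintro ⟨rfl, -⟩; exact absurd rfl h
          · omega

-- pointwise: "border ∧ palindromic prefix" ↔ "j ≤ lcp(s, reverse s) ∧ border"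
theorem cond_iff (cs : List Char) (j : Nat) (h2 : j ≤ cs.length) :
    (cs.take j = cs.drop (cs.length - j) ∧ (cs.take j).reverse = cs.take j) ↔
      (j ≤ lcpAlt cs cs.reverse ∧ cs.take j = cs.drop (cs.length - j)) := by
  have htr : cs.reverse.take j = (cs.drop (cs.length - j)).reverse := List.take_reverse
  have hiff := take_eq_take_iff_le_lcpAlt cs cs.reverse j h2 (by simpa using h2)
  constructor
  · rintro ⟨hb, hp⟩
    refine ⟨hiff.mp ?_, hb⟩
    rw [htr, ← hb, hp]
  · rintro ⟨hk, hb⟩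
    refine ⟨hb, ?_⟩
    have := hiff.mpr hk
    rw [htr, ← hb] at this
    exact this.symm

-- unfold both slices at a positive natural index
theorem slices_at (cs : List Char) (j : Nat) (hj : 0 < j) :
    PySem.List.slice cs none (some ((j : Nat) : Int)) = cs.take j ∧
      PySem.List.slice cs (some (-((j : Nat) : Int))) none = cs.drop (cs.length - j) :=
  ⟨PySem.List.slice_to_natCast cs j, PySem.List.slice_from_neg_natCast cs j hj⟩

-- ===== VERDICT (by name: the statement is the Claim_ definition above) =====
theorem countBorderPalindromes_spec : Claim_equal_countBorderPalindromes := by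
  intro s _
  unfold Spec_countBorderPalindromes countBorderPalindromes countBorderPalindromes_alt
  simp only [PySem.List.len_eq]
  set cs := s.toList with hcs
  set k := lcpAlt cs cs.reverse with hk
  have hkle : k ≤ cs.length := lcpAlt_le _ _
  rw [PySem.List.foldl_count_if, PySem.List.foldl_count_if]
  simp only [zero_add]
  by_cases hn : cs.length = 0
  · rw [hn]
    rw [PySem.List.pyRange_one_eq_nil (by omega), PySem.List.pyRange_one_eq_nil (by omega)]
    simp
  · have h1m : (1 : Int) ≤ min ((k : Int) + 1) (cs.length : Int) := by omega
    have hmn : min ((k : Int) + 1) (cs.length : Int) ≤ (cs.length : Int) := by omega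
    rw [PySem.List.pyRange_one_append 1 (min ((k : Int) + 1) (cs.length : Int)) (cs.length : Int) h1m hmn,
      List.countP_append]
    have hz : (PySem.List.pyRange (min ((k : Int) + 1) (cs.length : Int)) (cs.length : Int) 1).countP
        (fun i => (PySem.List.slice cs none (some i) == PySem.List.slice cs (some (-i)) none)
          && isPalindromeA (PySem.List.slice cs none (some i))) = 0 := by
      apply List.countP_eq_zero.mpr
      intro i hi
      rw [PySem.List.mem_pyRange_one] at hi
      obtain ⟨j, rfl⟩ : ∃ j : Nat, i = (j : Int) := ⟨i.toNat, by omega⟩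
      have hj0 : 0 < j := by omega
      have hjle : j ≤ cs.length := by omega
      obtain ⟨e1, e2⟩ := slices_at cs j hj0
      simp only [e1, e2, Bool.and_eq_true, beq_iff_eq, isPalindromeA_iff, not_and]
      intro hb hp
      have := (cond_iff cs j hjle).mp ⟨hb, hp⟩
      omega
    rw [hz, add_zero]
    congr 1
    apply List.countP_congr
    intro i hi
    rw [PySem.List.mem_pyRange_one] at hi
    obtain ⟨j, rfl⟩ : ∃ j : Nat, i = (j : Int) := ⟨i.toNat, by omega⟩
    have hj0 : 0 < j := by omega
    have hjle : j ≤ cs.length := by omega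
    have hjk : j ≤ k := by omega
    obtain ⟨e1, e2⟩ := slices_at cs j hj0
    simp only [e1, e2, Bool.and_eq_true, beq_iff_eq, isPalindromeA_iff]
    rw [cond_iff cs j hjle]
    simp only [and_iff_right_iff_imp]
    exact fun _ => hjk
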